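-- pv_equiv track=rewrite | github.com/chris-haste/fapilog | src/fapilog/plugins/sinks/contrib/postgres.py | _build_insert_columns
-- ===== SOURCE A (Python) =====
-- def _build_insert_columns(configured_fields: list[str]) -> list[str]:
--     seen: set[str] = set()
--     columns: list[str] = []
--     for field in configured_fields:
--         name = str(field).strip()
--         if not name:
--             continue
--         if name in seen:
--             continue
--         seen.add(name)
--         columns.append(name)
--
--     if "timestamp" not in seen:
--         columns.insert(0, "timestamp")
--     if "event" not in seen:
--         columns.append("event")
--     else:
--         # Ensure event is last for readability/consistency
--         columns = [c for c in columns if c != "event"] + ["event"]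
--     return columns
-- ===== SOURCE B (Python) =====
-- def _build_insert_columns(configured_fields: list[str]) -> list[str]:
--     body: list[str] = []
--     for field in reversed(configured_fields):
--         name = str(field).strip()
--         if name and name != "event":
--             body = [name] + [c for c in body if c != name]
--     prefix = [] if "timestamp" in body else ["timestamp"]
--     return prefix + body + ["event"]
-- ===== Notes on version B (the rewrite author's own statement) =====
-- stated objective: alternative
-- what changed: Replaces A's forward seen-set accumulation loop with insert(0)/rebuild fix-ups by a single backward pass over reversed(configured_fields) that keeps no seen set, instead deleting duplicates of each stripped name from the result built so far and dropping 'event' inside the pass, then prepending 'timestamp' if absent and appending 'event' once.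
import Mathlib
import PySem

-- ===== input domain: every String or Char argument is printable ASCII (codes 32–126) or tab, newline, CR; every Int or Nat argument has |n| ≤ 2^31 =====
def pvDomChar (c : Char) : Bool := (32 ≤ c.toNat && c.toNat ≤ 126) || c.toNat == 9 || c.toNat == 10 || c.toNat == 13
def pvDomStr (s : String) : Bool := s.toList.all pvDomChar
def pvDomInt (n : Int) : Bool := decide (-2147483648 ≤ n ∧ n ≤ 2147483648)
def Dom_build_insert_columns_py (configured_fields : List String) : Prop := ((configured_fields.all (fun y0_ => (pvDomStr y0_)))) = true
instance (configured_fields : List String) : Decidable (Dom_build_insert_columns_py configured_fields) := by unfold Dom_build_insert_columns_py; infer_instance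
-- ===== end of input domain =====

-- B replaces A's forward seen-set loop with insert(0)/rebuild fix-ups by a single backward
-- pass (reversed loop) that dedups by deleting duplicates of each name from the result built
-- so far and drops 'event' inside the pass (objective: alternative).

-- ===== PORT A =====
def build_insert_columns_py (configured_fields : List String) : List String :=
  let st := configured_fields.foldl
    (fun (st : PySem.Set String × List String) field =>
      let name := PySem.Str.strip field
      if name = "" then st
      else if PySem.Set.contains st.1 name then st
      else (PySem.Set.add st.1 name, st.2 ++ [name]))
    (PySem.Set.empty, [])
  let columns := if PySem.Set.contains st.1 "timestamp" then st.2 else "timestamp" :: st.2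
  if PySem.Set.contains st.1 "event" then
    (columns.filter (fun c => c ≠ "event")) ++ ["event"]
  else
    columns ++ ["event"]

-- ===== PORT B =====
-- B's reversed loop 'for field in reversed(configured_fields): body = step' is a foldr.
def pvColsB (fields : List String) : List String :=
  fields.foldr
    (fun f body =>
      let name := PySem.Str.strip f
      if name = "" ∨ name = "event" then body
      else name :: body.filter (fun c => c ≠ name))
    []

def build_insert_columns_py_alt (configured_fields : List String) : List String :=
  let body := pvColsB configured_fields
  let prefix_ := if "timestamp" ∈ body then ([] : List String) else ["timestamp"]
  prefix_ ++ body ++ ["event"]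

-- ===== PRECONDITION & SPEC =====
def Spec_build_insert_columns_py (configured_fields : List String) (out : List String) : Prop := out = build_insert_columns_py_alt configured_fields
instance (configured_fields : List String) (out : List String) : Decidable (Spec_build_insert_columns_py configured_fields out) := by unfold Spec_build_insert_columns_py; infer_instance

-- ===== CLAIM (what is proved, stated in full; the proofs are below) =====
def Claim_equal_build_insert_columns_py : Prop := ∀ (configured_fields : List String), Dom_build_insert_columns_py configured_fields → Spec_build_insert_columns_py configured_fields (build_insert_columns_py configured_fields)

-- ===== LEMMAS AND PROOFS =====

-- A's loop keeps seen and columns identical as lists; folded into one accumulator.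
theorem pv_loop_eq (l : List String) (s : PySem.Set String) :
    l.foldl
      (fun (st : PySem.Set String × List String) field =>
        let name := PySem.Str.strip field
        if name = "" then st
        else if PySem.Set.contains st.1 name then st
        else (PySem.Set.add st.1 name, st.2 ++ [name]))
      (s, s)
    = (l.foldl (fun t f => if PySem.Str.strip f = "" then t else PySem.Set.add t (PySem.Str.strip f)) s,
       l.foldl (fun t f => if PySem.Str.strip f = "" then t else PySem.Set.add t (PySem.Str.strip f)) s) := by
  induction l generalizing s with
  | nil => rfl
  | cons hd tl ih =>
    by_cases h : PySem.Str.strip hd = ""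
    · simpa [h] using ih s
    · by_cases hm : PySem.Str.strip hd ∈ s
      · simpa [h, hm] using ih s
      · have ha : PySem.Set.add s (PySem.Str.strip hd) = s ++ [PySem.Str.strip hd] := by
          simp [PySem.Set.add, hm]
        simpa [h, hm, ha] using ih (s ++ [PySem.Str.strip hd])

-- A's combined loop equals folding Set.add over the stripped non-empty names.
theorem pv_fold_filter (l : List String) (s : PySem.Set String) :
    l.foldl (fun t f => if PySem.Str.strip f = "" then t else PySem.Set.add t (PySem.Str.strip f)) s
    = ((l.map (fun f => PySem.Str.strip f)).filter (fun n => n ≠ "")).foldl PySem.Set.add s := by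
  induction l generalizing s with
  | nil => rfl
  | cons hd tl ih =>
    by_cases h : PySem.Str.strip hd = "" <;> simp [h, ih]

-- Folding Set.add from an arbitrary start = start ++ (dedup of the rest not already present).
theorem pv_foldl_add (xs : List String) (s : List String) :
    xs.foldl PySem.Set.add s
    = s ++ (xs.foldl PySem.Set.add []).filter (fun y => y ∉ s) := by
  induction xs generalizing s with
  | nil => simp
  | cons x xs ih =>
    have hx : ([] : List String).foldl PySem.Set.add ([x]) = PySem.Set.add [] x := rfl
    by_cases hm : x ∈ s
    · have h1 : PySem.Set.add s x = s := by simp [PySem.Set.add, PySem.Set.contains, hm]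
      have h2 : PySem.Set.add ([] : List String) x = [x] := by
        simp [PySem.Set.add, PySem.Set.contains]
      rw [List.foldl_cons, List.foldl_cons, h1, h2, ih s, ih [x]]
      congr 1
      rw [List.filter_append]
      have : List.filter (fun y => decide ¬y ∈ s) [x] = [] := by simp [hm]
      rw [this, List.nil_append, List.filter_filter]
      apply List.filter_congr
      intro y _
      by_cases hyx : y = x
      · simp [hyx, hm]
      · simp [hyx]
    · have h1 : PySem.Set.add s x = s ++ [x] := by
        simp [PySem.Set.add, PySem.Set.contains, hm]
      have h2 : PySem.Set.add ([] : List String) x = [x] := by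
        simp [PySem.Set.add, PySem.Set.contains]
      rw [List.foldl_cons, List.foldl_cons, h1, h2, ih (s ++ [x]), ih [x]]
      rw [List.filter_append, List.append_assoc]
      congr 1
      have : List.filter (fun y => decide ¬y ∈ s) [x] = [x] := by simp [hm]
      rw [this]
      congr 1
      rw [List.filter_filter]
      apply List.filter_congr
      intro y _
      by_cases hyx : y = x
      · simp [hyx, hm]
      · simp [hyx]

-- dedup of a cons: head first, later duplicates of it filtered out.
theorem pv_dedup_cons (x : String) (xs : List String) :
    (x :: xs).foldl PySem.Set.add ([] : List String)
    = x :: (xs.foldl PySem.Set.add []).filter (fun y => y ≠ x) := by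
  have h2 : PySem.Set.add ([] : List String) x = [x] := by
    simp [PySem.Set.add, PySem.Set.contains]
  rw [List.foldl_cons, h2, pv_foldl_add xs [x]]
  simp

-- B's recursion computes A's ordered dedup with 'event' filtered out.
theorem pv_colsB_eq (l : List String) :
    pvColsB l
    = (((l.map (fun f => PySem.Str.strip f)).filter (fun n => n ≠ "")).foldl PySem.Set.add []).filter
        (fun c => c ≠ "event") := by
  induction l with
  | nil => rfl
  | cons f tl ih =>
    by_cases h0 : PySem.Str.strip f = ""
    · simpa [pvColsB, h0] using ih
    · by_cases he : PySem.Str.strip f = "event"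
      · rw [show pvColsB (f :: tl) = pvColsB tl by simp [pvColsB, he]]
        simp only [List.map_cons, List.filter_cons]
        rw [if_pos (by simpa using h0), pv_dedup_cons, List.filter_cons]
        rw [if_neg (by simp [he]), List.filter_filter]
        rw [ih]
        apply (List.filter_congr ?_).symm
        intro y _
        by_cases hy : y = "event" <;> simp [hy, he]
      · rw [show pvColsB (f :: tl)
              = PySem.Str.strip f :: (pvColsB tl).filter (fun c => c ≠ PySem.Str.strip f) by
            simp [pvColsB, h0, he]]
        simp only [List.map_cons, List.filter_cons]
        rw [if_pos (by simpa using h0), pv_dedup_cons, List.filter_cons]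
        rw [if_pos (by simpa using he)]
        congr 1
        rw [ih, List.filter_filter, List.filter_filter]
        apply List.filter_congr
        intro y _
        by_cases h1 : y = "event" <;> by_cases h2 : y = PySem.Str.strip f <;> simp [h1, h2, he]

theorem pv_filter_eq_self_of_not_mem (r : List String) (h : "event" ∉ r) :
    r.filter (fun c => !decide (c = "event")) = r := by
  apply List.filter_eq_self.mpr
  intro a ha
  simp only [Bool.not_eq_eq_eq_not, Bool.not_true, decide_eq_false_iff_not]
  exact fun he => h (he ▸ ha)

-- A's final timestamp/event fix-up agrees with B's assembly over body = r.filter (≠ "event").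
theorem pv_assemble (r : List String) :
    (if PySem.Set.contains r "event" then
      ((if PySem.Set.contains r "timestamp" then r else "timestamp" :: r).filter
          (fun c => c ≠ "event")) ++ ["event"]
     else (if PySem.Set.contains r "timestamp" then r else "timestamp" :: r) ++ ["event"])
    = (if "timestamp" ∈ r.filter (fun c => c ≠ "event") then ([] : List String) else ["timestamp"]) ++
        r.filter (fun c => c ≠ "event") ++ ["event"] := by
  have hmem : ("timestamp" ∈ r.filter (fun c => c ≠ "event")) ↔ "timestamp" ∈ r := by
    simp [List.mem_filter]
  by_cases hE : "event" ∈ r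
  · by_cases hT : "timestamp" ∈ r
    · simp [hT]
      exact fun h => absurd hE h
    · simp [hT]
      exact fun h => absurd hE h
  · by_cases hT : "timestamp" ∈ r
    · simp [hT]
      exact fun _ => (pv_filter_eq_self_of_not_mem r hE).symm
    · simp [hT]
      exact fun _ => (pv_filter_eq_self_of_not_mem r hE).symm

-- ===== VERDICT (by name: the statement is the Claim_ definition above) =====
theorem build_insert_columns_py_spec : Claim_equal_build_insert_columns_py := by
  intro l _
  unfold Spec_build_insert_columns_py build_insert_columns_py build_insert_columns_py_alt
  rw [show ((PySem.Set.empty : PySem.Set String), ([] : List String))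
        = ((PySem.Set.empty : PySem.Set String), (PySem.Set.empty : PySem.Set String)) from rfl,
      pv_loop_eq l PySem.Set.empty, pv_fold_filter l PySem.Set.empty]
  rw [pv_colsB_eq l]
  exact pv_assemble (((l.map (fun f => PySem.Str.strip f)).filter (fun n => n ≠ "")).foldl PySem.Set.add PySem.Set.empty)
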